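-- pv_equiv track=rewrite | github.com/dannykwaktk/- | 인공지능과 보안기술_실습과제_1.py | comb_all
-- ===== SOURCE A (Python) =====
-- def comb_all(arr, length):
--
--     res = []
--     for i in arr:
--         if i not in res:
--                 res.append(i)
--
--     for i in range(len(res)):
--         if length==1:
--             yield res[i]
--         else:
--             for next in comb_all(res[i+1:len(res)], length-1):
--                 yield res[i]+ "," +next
-- ===== SOURCE B (Python) =====
-- def comb_all(arr, length):
--     res = list(dict.fromkeys(arr))
--     if length < 1:
--         return
--     def combs(items, k):
--         if k == 0:
--             return [[]]
--         if len(items) < k: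
--             return []
--         head, tail = items[0], items[1:]
--         return [[head] + c for c in combs(tail, k - 1)] + combs(tail, k)
--     for c in combs(res, length):
--         yield ",".join(c)
-- ===== Notes on version B (the rewrite author's own statement) =====
-- stated objective: alternative
-- what changed: A's quadratic membership-scan dedup and per-suffix generator recursion that grows each string one prefix at a time are replaced by a dict.fromkeys dedup plus a take/skip recursion that builds each combination as a list and joins it with ',' once at the end.
import Mathlib
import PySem

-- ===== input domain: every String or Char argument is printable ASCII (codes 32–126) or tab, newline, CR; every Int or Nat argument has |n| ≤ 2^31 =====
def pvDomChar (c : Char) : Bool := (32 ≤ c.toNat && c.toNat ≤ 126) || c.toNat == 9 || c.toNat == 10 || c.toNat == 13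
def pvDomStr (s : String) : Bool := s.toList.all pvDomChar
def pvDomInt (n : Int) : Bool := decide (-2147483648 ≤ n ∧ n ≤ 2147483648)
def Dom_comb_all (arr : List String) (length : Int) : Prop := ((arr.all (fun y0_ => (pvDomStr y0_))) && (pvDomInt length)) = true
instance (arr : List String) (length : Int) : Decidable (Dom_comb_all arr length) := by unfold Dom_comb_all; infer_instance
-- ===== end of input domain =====

-- B replaces A's recursion over shrinking suffixes (with per-level string concatenation and a
-- quadratic membership-scan dedup) by a dict.fromkeys dedup plus a take/skip recursion building
-- the combinations as lists that are joined once at the end; objective: alternative decomposition.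

-- ===== PORT A =====
-- A's first loop: res = []; for i in arr: if i not in res: res.append(i)
def pvDedupA (arr : List String) : List String :=
  arr.foldl (fun res i => if i ∈ res then res else res ++ [i]) []

-- needed by the ports' termination proofs
theorem pvDedupA_foldl_length (l acc : List String) :
    (l.foldl (fun res i => if i ∈ res then res else res ++ [i]) acc).length ≤ acc.length + l.length := by
  induction l generalizing acc with
  | nil => simp
  | cons x t ih =>
    simp only [List.foldl_cons]
    by_cases hx : x ∈ acc
    · simp only [if_pos hx]
      have := ih acc
      simp only [List.length_cons]; omega
    · simp only [if_neg hx]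
      have := ih (acc ++ [x])
      simp only [List.length_append, List.length_cons, List.length_nil] at this ⊢
      omega

theorem pvDedupA_length_le (arr : List String) : (pvDedupA arr).length ≤ arr.length := by
  have := pvDedupA_foldl_length arr []
  simpa [pvDedupA] using this

-- A's generator: for i in range(len(res)): if length==1: yield res[i]
--                else: for next in comb_all(res[i+1:len(res)], length-1): yield res[i]+","+next
-- The indexed loop over res with the suffix res[i+1:] is transliterated as structural recursion
-- over res (head = res[i], tail = res[i+1:len(res)]); the yields accumulate into a list.
mutual
def comb_all (arr : List String) (length : Int) : List String :=
  comb_allGo (pvDedupA arr) length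
termination_by (2 * arr.length + 1, 0)
decreasing_by
  have := pvDedupA_length_le arr
  simp only [Prod.lex_def]; omega

def comb_allGo : List String → Int → List String
  | [], _ => []
  | x :: rest, length =>
    (if length = 1 then [x]
     else (comb_all rest (length - 1)).map (fun next => x ++ "," ++ next))
    ++ comb_allGo rest length
termination_by res _ => (2 * res.length, 1)
decreasing_by
  · simp only [Prod.lex_def, List.length_cons]; omega
  · simp only [Prod.lex_def, List.length_cons]; omega
end

-- ===== PORT B =====
-- Source B's combs(items, k): take/skip recursion returning the k-combinations as lists
def pvCombs (items : List String) (k : Int) : List (List String) :=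
  if k = 0 then [[]]
  else if (items.length : Int) < k then []
  else match items with
    | [] => []   -- unreachable: here 0 < k ≤ items.length
    | head :: tail => (pvCombs tail (k - 1)).map (fun c => head :: c) ++ pvCombs tail k
termination_by items.length
decreasing_by
  · simp only [List.length_cons]; omega
  · simp only [List.length_cons]; omega

def comb_all_alt (arr : List String) (length : Int) : List String :=
  let res := PySem.List.dedup arr        -- list(dict.fromkeys(arr))
  if length < 1 then []
  else (pvCombs res length).map (fun c => PySem.Str.join "," c)

-- ===== PRECONDITION & SPEC =====
def Spec_comb_all (arr : List String) (length : Int) (out : List String) : Prop := out = comb_all_alt arr length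
instance (arr : List String) (length : Int) (out : List String) : Decidable (Spec_comb_all arr length out) := by unfold Spec_comb_all; infer_instance

-- ===== CLAIM (what is proved, stated in full; the proofs are below) =====
def Claim_equal_comb_all : Prop := ∀ (arr : List String) (length : Int), Dom_comb_all arr length → Spec_comb_all arr length (comb_all arr length)

-- ===== LEMMAS AND PROOFS =====

theorem comb_all_eq_go (arr : List String) (L : Int) :
    comb_all arr L = comb_allGo (pvDedupA arr) L := by
  rw [comb_all.eq_def]

theorem comb_allGo_nil (L : Int) : comb_allGo [] L = [] := by
  rw [comb_allGo.eq_def]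

theorem comb_allGo_cons (x : String) (rest : List String) (L : Int) :
    comb_allGo (x :: rest) L =
      (if L = 1 then [x]
       else (comb_all rest (L - 1)).map (fun next => x ++ "," ++ next)) ++ comb_allGo rest L := by
  rw [comb_allGo.eq_def]

theorem pvDedupA_eq_dedup (arr : List String) : pvDedupA arr = PySem.List.dedup arr := by
  unfold pvDedupA PySem.List.dedup PySem.Set.ofList
  congr 1
  funext s x
  simp [PySem.Set.add]

theorem pvDedupA_foldl_of_nodup (l : List String) :
    ∀ acc : List String, l.Nodup → (∀ a ∈ l, a ∉ acc) →
      l.foldl (fun res i => if i ∈ res then res else res ++ [i]) acc = acc ++ l := by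
  induction l with
  | nil => intro acc _ _; simp
  | cons x t ih =>
    intro acc hnd hdisj
    have hx : x ∉ acc := hdisj x (by simp)
    simp only [List.foldl_cons, if_neg hx]
    rw [ih (acc ++ [x]) (List.Nodup.of_cons hnd)]
    · simp
    · intro a ha
      simp only [List.mem_append, List.mem_singleton]
      push Not
      exact ⟨hdisj a (by simp [ha]), fun h => (List.nodup_cons.mp hnd).1 (h ▸ ha)⟩

theorem pvDedupA_of_nodup (l : List String) (h : l.Nodup) : pvDedupA l = l := by
  unfold pvDedupA
  simpa using pvDedupA_foldl_of_nodup l [] h (by simp)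

theorem pvDedupA_nodup (arr : List String) : (pvDedupA arr).Nodup := by
  rw [pvDedupA_eq_dedup]
  exact PySem.List.nodup_dedup arr

-- unfolding equations for pvCombs
theorem pvCombs_zero (items : List String) : pvCombs items 0 = [[]] := by
  rw [pvCombs.eq_def]; simp

theorem pvCombs_nil (k : Int) (hk : k ≠ 0) : pvCombs [] k = [] := by
  rw [pvCombs.eq_def]
  simp only [if_neg hk]
  split_ifs <;> rfl

theorem pvCombs_big (items : List String) (k : Int) (hk : k ≠ 0)
    (h : (items.length : Int) < k) : pvCombs items k = [] := by
  rw [pvCombs.eq_def]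
  simp [hk, h]

theorem pvCombs_cons (x : String) (t : List String) (k : Int) (hk : k ≠ 0)
    (h : ¬ ((x :: t).length : Int) < k) :
    pvCombs (x :: t) k = (pvCombs t (k - 1)).map (fun c => x :: c) ++ pvCombs t k := by
  rw [pvCombs.eq_def, if_neg hk, if_neg h]

theorem pvCombs_length (items : List String) :
    ∀ (k : Int), 0 ≤ k → ∀ c ∈ pvCombs items k, (c.length : Int) = k := by
  induction items with
  | nil =>
    intro k hk c hc
    by_cases h0 : k = 0
    · subst h0; rw [pvCombs_zero] at hc; simp at hc; simp [hc]
    · rw [pvCombs_nil k h0] at hc; simp at hc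
  | cons x t ih =>
    intro k hk c hc
    by_cases h0 : k = 0
    · subst h0; rw [pvCombs_zero] at hc; simp at hc; simp [hc]
    · by_cases hlen : ((x :: t).length : Int) < k
      · rw [pvCombs_big _ k h0 hlen] at hc; simp at hc
      · rw [pvCombs_cons x t k h0 hlen] at hc
        rcases List.mem_append.mp hc with hm | hm
        · obtain ⟨c', hc', rfl⟩ := List.mem_map.mp hm
          have := ih (k - 1) (by omega) c' hc'
          simp only [List.length_cons]
          push_cast
          omega
        · exact ih k hk c hm

theorem join_comma_cons (x : String) (c : List String) (h : c ≠ []) :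
    PySem.Str.join "," (x :: c) = x ++ "," ++ PySem.Str.join "," c := by
  obtain ⟨y, c', rfl⟩ := List.exists_cons_of_ne_nil h
  rw [← String.toList_inj]
  simp only [PySem.Str.toList_join, String.toList_append, List.map_cons]
  rw [PySem.Chars.join_cons_cons]

theorem join_comma_singleton (x : String) : PySem.Str.join "," [x] = x := by
  rw [← String.toList_inj]
  simp only [PySem.Str.toList_join, List.map_cons, List.map_nil]
  rw [PySem.Chars.join_singleton]

-- for length <= 0 both A's branches recurse forever downward and nothing is ever yielded
theorem comb_allGo_nonpos :
    ∀ (n : Nat) (res : List String) (L : Int), res.length ≤ n → L ≤ 0 → comb_allGo res L = [] := by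
  intro n
  induction n with
  | zero =>
    intro res L hlen _
    have : res = [] := List.eq_nil_of_length_eq_zero (Nat.le_zero.mp hlen)
    subst this
    exact comb_allGo_nil L
  | succ n ih =>
    intro res L hlen hL
    cases res with
    | nil => exact comb_allGo_nil L
    | cons x rest =>
      simp only [List.length_cons] at hlen
      have h1 : ¬ (L = 1) := by omega
      rw [comb_allGo_cons, if_neg h1, comb_all_eq_go]
      rw [ih (pvDedupA rest) (L - 1) (le_trans (pvDedupA_length_le rest) (by omega)) (by omega)]
      rw [ih rest L (by omega) hL]
      simp

-- the heart: on a duplicate-free list the suffix recursion of A enumerates exactly B's combinations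
theorem comb_allGo_eq_alt (res : List String) :
    res.Nodup → ∀ (L : Int),
      comb_allGo res L = if L < 1 then [] else (pvCombs res L).map (fun c => PySem.Str.join "," c) := by
  induction res with
  | nil =>
    intro _ L
    by_cases hL : L < 1
    · simp [comb_allGo_nil, hL]
    · rw [comb_allGo_nil, if_neg hL, pvCombs_nil L (by omega)]
      simp
  | cons x rest ih =>
    intro hnd L
    have hrest : rest.Nodup := List.Nodup.of_cons hnd
    by_cases hL : L < 1
    · rw [if_pos hL]
      exact comb_allGo_nonpos (x :: rest).length (x :: rest) L le_rfl (by omega)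
    · rw [if_neg hL]
      by_cases h1 : L = 1
      · subst h1
        rw [comb_allGo_cons, if_pos rfl, ih hrest 1, if_neg (by omega)]
        rw [pvCombs_cons x rest 1 (by omega) (by simp only [List.length_cons]; push_cast; omega)]
        simp only [sub_self, pvCombs_zero, List.map_cons, List.map_nil, List.map_append]
        simp [join_comma_singleton]
      · -- L ≥ 2
        have hL2 : 2 ≤ L := by omega
        rw [comb_allGo_cons, if_neg h1, comb_all_eq_go, pvDedupA_of_nodup rest hrest]
        rw [ih hrest (L - 1), if_neg (by omega), ih hrest L, if_neg hL]
        by_cases hbig : ((x :: rest).length : Int) < L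
        · rw [pvCombs_big (x :: rest) L (by omega) hbig]
          rw [pvCombs_big rest (L - 1) (by omega) (by simp at hbig ⊢; omega)]
          rw [pvCombs_big rest L (by omega) (by simp at hbig ⊢; omega)]
          simp
        · rw [pvCombs_cons x rest L (by omega) hbig]
          rw [List.map_append, List.map_map, List.map_map]
          congr 1
          apply List.map_congr_left
          intro c hc
          have hclen := pvCombs_length rest (L - 1) (by omega) c hc
          have hcne : c ≠ [] := by
            intro h
            subst h
            simp at hclen
            omega
          simp only [Function.comp_apply]
          rw [join_comma_cons x c hcne]

theorem comb_all_eq_alt (arr : List String) (L : Int) : comb_all arr L = comb_all_alt arr L := by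
  rw [comb_all_eq_go, comb_allGo_eq_alt (pvDedupA arr) (pvDedupA_nodup arr) L]
  unfold comb_all_alt
  rw [pvDedupA_eq_dedup]

-- ===== VERDICT (by name: the statement is the Claim_ definition above) =====
theorem comb_all_spec : Claim_equal_comb_all := by
  intro arr length _
  unfold Spec_comb_all
  exact comb_all_eq_alt arr length
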